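-- pv_equiv track=rewrite | github.com/oaa-accessibility/oaa-django | utilities.py | OAAMarkupToHTML
-- ===== SOURCE A (Python) =====
-- def OAAMarkupToHTML(str):
--   str1 = ""
--
--   if str and len(str):
--     str = str.replace("%s", "must")
--
--     code = "<code>"
--     for c in str:
--       if c == '@':
--         str1 += code;
--         if code == "<code>":
--           code = "</code>"
--         else:
--           code = "<code>"
--       else:
--         str1 += c
--   return str1
-- ===== SOURCE B (Python) =====
-- def OAAMarkupToHTML(str):
--     if not str:
--         return ""
--     segments = str.replace("%s", "must").split('@')
--     parts = [segments[0]]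
--     for i, seg in enumerate(segments[1:]):
--         parts.append("<code>" if i % 2 == 0 else "</code>")
--         parts.append(seg)
--     return "".join(parts)
-- ===== Notes on version B (the rewrite author's own statement) =====
-- stated objective: simpler
-- what changed: B splits the string once on the separator character and joins the segments with alternating <code>/</code> tags interleaved by index parity, instead of A's character-by-character loop that toggles a state variable and grows the result by repeated string concatenation.
import Mathlib
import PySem

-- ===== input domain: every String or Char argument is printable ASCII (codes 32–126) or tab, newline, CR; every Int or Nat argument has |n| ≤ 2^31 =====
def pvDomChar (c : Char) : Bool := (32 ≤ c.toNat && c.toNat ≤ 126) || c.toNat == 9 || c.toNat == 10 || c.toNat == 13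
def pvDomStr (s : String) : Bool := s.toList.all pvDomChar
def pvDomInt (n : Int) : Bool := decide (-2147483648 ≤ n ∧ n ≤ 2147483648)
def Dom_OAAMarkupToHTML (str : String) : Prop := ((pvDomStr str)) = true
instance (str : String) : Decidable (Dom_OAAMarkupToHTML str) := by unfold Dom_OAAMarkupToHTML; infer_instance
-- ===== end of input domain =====

-- B replaces A's per-character toggle loop by one split on '@' plus interleaved alternating tags (simpler decomposition; same return values).

-- ===== PORT A =====
-- the for-loop of A: state = (str1, code), scanned character by character
def pvGoA : List Char → List Char → List Char → List Char
  | [], str1, _ => str1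
  | c :: cs, str1, code =>
    if c = '@' then
      pvGoA cs (str1 ++ code)
        (if code = "<code>".toList then "</code>".toList else "<code>".toList)
    else
      pvGoA cs (str1 ++ [c]) code

def OAAMarkupToHTML (str : String) : String :=
  if str = "" then "" else
    String.ofList (pvGoA (PySem.Str.replace str "%s" "must").toList [] "<code>".toList)

-- ===== PORT B =====
-- Source B's loop body: append the alternating tag (by index parity) and the segment
def pvStepB (acc : List Char) (p : List Char × Nat) : List Char :=
  acc ++ (if p.2 % 2 = 0 then "<code>".toList else "</code>".toList) ++ p.1

def OAAMarkupToHTML_alt (str : String) : String :=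
  if str = "" then "" else
    match (PySem.Str.replace str "%s" "must").toList.splitOn '@' with
    | [] => ""   -- unreachable: split never returns an empty list
    | s0 :: rest => String.ofList (rest.zipIdx.foldl pvStepB s0)

-- ===== PRECONDITION & SPEC =====
def Spec_OAAMarkupToHTML (str : String) (out : String) : Prop := out = OAAMarkupToHTML_alt str
instance (str : String) (out : String) : Decidable (Spec_OAAMarkupToHTML str out) := by unfold Spec_OAAMarkupToHTML; infer_instance

-- ===== CLAIM (what is proved, stated in full; the proofs are below) =====
def Claim_equal_OAAMarkupToHTML : Prop := ∀ (str : String), Dom_OAAMarkupToHTML str → Spec_OAAMarkupToHTML str (OAAMarkupToHTML str)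

-- ===== LEMMAS AND PROOFS =====

-- the tag emitted before the segment at (0-based) separator index k
def pvTag (k : Nat) : List Char := if k % 2 = 0 then "<code>".toList else "</code>".toList

-- the interleaving that Source B's loop produces on the segments after the first
def pvBuild : Nat → List (List Char) → List Char
  | _, [] => []
  | k, s :: rest => pvTag k ++ s ++ pvBuild (k + 1) rest

theorem pvTag_flip (k : Nat) :
    (if pvTag k = "<code>".toList then "</code>".toList else "<code>".toList) = pvTag (k + 1) := by
  unfold pvTag
  rcases Nat.even_or_odd k with h | h
  · simp [Nat.even_iff.mp h, Nat.succ_mod_two_eq_one_iff.mpr (Nat.even_iff.mp h)]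
  · have h1 : k % 2 = 1 := Nat.odd_iff.mp h
    simp [h1, Nat.succ_mod_two_eq_zero_iff.mpr h1]

theorem pvSplitOn_ne_nil (cs : List Char) : cs.splitOn '@' ≠ [] := by
  show List.splitOnP (fun x => x == '@') cs ≠ []
  induction cs with
  | nil => simp [List.splitOnP, List.splitOnP.go]
  | cons c cs ih =>
    rw [List.splitOnP_cons]
    split
    · simp
    · simpa [List.modifyHead_eq_nil_iff] using ih

theorem pvGoA_eq_build : ∀ (cs str1 : List Char) (k : Nat) (s0 : List Char)
    (rest : List (List Char)), cs.splitOn '@' = s0 :: rest →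
    pvGoA cs str1 (pvTag k) = str1 ++ s0 ++ pvBuild k rest := by
  intro cs
  induction cs with
  | nil =>
    intro str1 k s0 rest h
    simp [List.splitOn, List.splitOnP, List.splitOnP.go] at h
    obtain ⟨h1, h2⟩ := h
    simp [pvGoA, h1, h2, pvBuild]
  | cons c cs ih =>
    intro str1 k s0 rest h
    have hsf : cs.splitOn '@' = List.splitOnP (fun x => x == '@') cs := rfl
    obtain ⟨t0, trest, ht⟩ := List.exists_cons_of_ne_nil (pvSplitOn_ne_nil cs)
    by_cases hc : c = '@'
    · subst hc
      replace h : List.splitOnP (fun x => x == '@') ('@' :: cs) = s0 :: rest := h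
      rw [List.splitOnP_cons] at h
      simp only [BEq.rfl, if_true] at h
      rw [← hsf, ht] at h
      injection h with h1 h2
      simp only [pvGoA, if_pos]
      rw [pvTag_flip, ih _ (k + 1) t0 trest ht]
      simp [← h1, ← h2, pvBuild]
    · have hbc : (c == '@') = false := by simp [hc]
      replace h : List.splitOnP (fun x => x == '@') (c :: cs) = s0 :: rest := h
      rw [List.splitOnP_cons, hbc, if_neg (by simp), ← hsf, ht] at h
      simp only [List.modifyHead] at h
      injection h with h1 h2
      simp only [pvGoA, if_neg hc]
      rw [ih _ k t0 trest ht]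
      simp [← h1, ← h2]

theorem pvFoldB_eq_build : ∀ (rest : List (List Char)) (acc : List Char) (k : Nat),
    ((rest.zipIdx k).foldl pvStepB acc) = acc ++ pvBuild k rest := by
  intro rest
  induction rest with
  | nil => intro acc k; simp [pvBuild]
  | cons s rest ih =>
    intro acc k
    rw [List.zipIdx_cons, List.foldl_cons, ih]
    simp [pvStepB, pvBuild, pvTag]

-- ===== VERDICT (by name: the statement is the Claim_ definition above) =====
theorem OAAMarkupToHTML_spec : Claim_equal_OAAMarkupToHTML := by
  intro str _
  unfold Spec_OAAMarkupToHTML OAAMarkupToHTML OAAMarkupToHTML_alt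
  by_cases h : str = ""
  · simp [h]
  · rw [if_neg h, if_neg h]
    set cs := (PySem.Str.replace str "%s" "must").toList with hcs
    obtain ⟨s0, rest, hsplit⟩ := List.exists_cons_of_ne_nil (pvSplitOn_ne_nil cs)
    rw [hsplit]
    show String.ofList (pvGoA cs [] "<code>".toList) = String.ofList (rest.zipIdx.foldl pvStepB s0)
    rw [show "<code>".toList = pvTag 0 from rfl, pvGoA_eq_build cs [] 0 s0 rest hsplit,
        pvFoldB_eq_build rest s0 0]
    simp
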